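-- pv_equiv track=rewrite | github.com/JuweiLin/Topic-Identification-New | DataProcess.py | compute_tran_labels
-- ===== SOURCE A (Python) =====
-- def compute_tran_labels(recs):
--     tran, prev_is_new1 = [], False
--     for r in recs:
--         lbl = str(r.get("label","")).strip().upper().replace("$","").replace("_","")
--         is_new1 = (lbl == "NEW1")
--         tran.append(1 if (is_new1 and not prev_is_new1) else 0)
--         prev_is_new1 = is_new1
--     return tran
-- ===== SOURCE B (Python) =====
-- def compute_tran_labels(recs):
--     flags = [str(r.get("label", "")).strip().upper().replace("$", "").replace("_", "") == "NEW1"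
--              for r in recs]
--     out = []
--     i, n = 0, len(flags)
--     while i < n:
--         if flags[i]:
--             j = i + 1
--             while j < n and flags[j]:
--                 j += 1
--             out.extend([1] + [0] * (j - i - 1))
--             i = j
--         else:
--             out.append(0)
--             i += 1
--     return out
-- ===== Notes on version B (the rewrite author's own statement) =====
-- stated objective: alternative
-- what changed: Replaces A's per-element carry comparison with a run-length scan: an outer loop finds each maximal run of NEW1 records via an inner while loop and emits [1]+[0]*(runlen-1) for the whole run at once, appending single zeros elsewhere.
import Mathlib
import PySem

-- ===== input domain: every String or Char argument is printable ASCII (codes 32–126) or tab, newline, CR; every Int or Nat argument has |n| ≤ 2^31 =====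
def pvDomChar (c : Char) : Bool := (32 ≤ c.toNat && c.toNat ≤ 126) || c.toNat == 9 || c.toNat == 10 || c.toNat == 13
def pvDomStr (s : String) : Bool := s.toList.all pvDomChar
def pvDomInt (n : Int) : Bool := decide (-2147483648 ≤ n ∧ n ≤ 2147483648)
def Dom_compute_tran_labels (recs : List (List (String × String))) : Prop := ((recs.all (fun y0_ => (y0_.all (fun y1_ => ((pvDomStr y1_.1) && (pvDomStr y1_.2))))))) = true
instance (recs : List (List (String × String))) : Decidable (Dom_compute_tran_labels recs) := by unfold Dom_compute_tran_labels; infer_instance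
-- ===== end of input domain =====

-- B replaces A's per-element carry loop with a run-length scan emitting [1]+zeros per maximal NEW1 run (objective: alternative).

-- ===== PORT A =====
def compute_tran_labels (recs : List (List (String × String))) : List Int :=
  (recs.foldl
    (fun (st : List Int × Bool) r =>
      let lbl := PySem.Str.replace
        (PySem.Str.replace (PySem.Str.upper (PySem.Str.strip ((PySem.Dict.mk r).getD "label" ""))) "$" "") "_" ""
      let is_new1 := lbl == "NEW1"
      (st.1 ++ [if is_new1 && !st.2 then (1 : Int) else 0], is_new1))
    ([], false)).1

-- ===== PORT B =====
def pvFlag (r : List (String × String)) : Bool :=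
  PySem.Str.replace
    (PySem.Str.replace (PySem.Str.upper (PySem.Str.strip ((PySem.Dict.mk r).getD "label" ""))) "$" "") "_" ""
    == "NEW1"

-- Source B's run scan: at a True flag the inner while advances j over the run (takeWhile/dropWhile),
-- emitting [1] + (runlen-1) zeros at once; at a False flag a single zero is appended.
def pvEmit : List Bool → List Int
  | [] => []
  | false :: fs => 0 :: pvEmit fs
  | true :: fs =>
      (1 : Int) :: (List.replicate (fs.takeWhile (fun b => b)).length 0
        ++ pvEmit (fs.dropWhile (fun b => b)))
termination_by fs => fs.length
decreasing_by
  · simp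
  · have := List.length_dropWhile_le (fun b => b) fs
    simp; omega

def compute_tran_labels_alt (recs : List (List (String × String))) : List Int :=
  pvEmit (recs.map pvFlag)

-- ===== PRECONDITION & SPEC =====
def Spec_compute_tran_labels (recs : List (List (String × String))) (out : List Int) : Prop := out = compute_tran_labels_alt recs
instance (recs : List (List (String × String))) (out : List Int) : Decidable (Spec_compute_tran_labels recs out) := by unfold Spec_compute_tran_labels; infer_instance

-- ===== CLAIM =====
def Claim_equal_compute_tran_labels : Prop := ∀ (recs : List (List (String × String))), Dom_compute_tran_labels recs → Spec_compute_tran_labels recs (compute_tran_labels recs)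

-- ===== LEMMAS AND PROOFS =====

-- A's result viewed as an adjacent-pair map with carry prev
def pvAZip (prev : Bool) (fs : List Bool) : List Int :=
  (fs.zip (prev :: fs)).map (fun p => if p.1 && !p.2 then (1 : Int) else 0)

theorem pv_foldl_eq (recs : List (List (String × String))) (acc : List Int) (prev : Bool) :
    (recs.foldl
      (fun (st : List Int × Bool) r =>
        let lbl := PySem.Str.replace
          (PySem.Str.replace (PySem.Str.upper (PySem.Str.strip ((PySem.Dict.mk r).getD "label" ""))) "$" "") "_" ""
        let is_new1 := lbl == "NEW1"
        (st.1 ++ [if is_new1 && !st.2 then (1 : Int) else 0], is_new1))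
      (acc, prev)).1
    = acc ++ pvAZip prev (recs.map pvFlag) := by
  induction recs generalizing acc prev with
  | nil => simp [pvAZip]
  | cons r rs ih =>
    simp only [List.foldl_cons, List.map_cons, pvAZip, List.zip_cons_cons, List.map_cons]
    rw [ih]
    simp [pvFlag, pvAZip, List.append_assoc]

-- inside a run (carry = true) every element of the True prefix contributes 0,
-- and past the run the carry no longer matters (the next flag is False or the list ends)
theorem pv_azip_true (fs : List Bool) :
    pvAZip true fs
      = List.replicate (fs.takeWhile (fun b => b)).length 0
        ++ pvAZip false (fs.dropWhile (fun b => b)) := by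
  induction fs with
  | nil => rfl
  | cons b gs ih =>
    cases b with
    | true =>
      simp only [List.takeWhile_cons, List.dropWhile_cons]
      simpa [pvAZip, List.replicate_succ] using ih
    | false =>
      simp [pvAZip]

theorem pv_emit_eq (fs : List Bool) : pvEmit fs = pvAZip false fs := by
  induction fs using pvEmit.induct with
  | case1 => simp [pvEmit, pvAZip]
  | case2 gs ih => simpa [pvEmit, pvAZip] using ih
  | case3 gs ih =>
    have h : pvAZip false (true :: gs) = 1 :: pvAZip true gs := by simp [pvAZip]
    rw [pvEmit, h, pv_azip_true gs, ih]

-- ===== VERDICT =====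
theorem compute_tran_labels_spec : Claim_equal_compute_tran_labels := by
  intro recs _
  show compute_tran_labels recs = compute_tran_labels_alt recs
  simp only [compute_tran_labels, compute_tran_labels_alt]
  rw [pv_foldl_eq, pv_emit_eq]
  simp
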